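-- pv_equiv track=rewrite | github.com/van4956/project_clash_royale | modules/functions.py | group_class_name
-- ===== SOURCE A (Python) =====
-- from collections import Counter, defaultdict
-- from typing import List, Tuple
--
-- def group_class_name(rows: List[List[str]], threshold: int = 3) -> List[str]:
--     """
--     Принимает список строк, состоящих из перечня class_name, и пороговое значение threshold.
--
--     Берём элемент в первой строке и идём вниз, вырезая совпадения
--     Новая итерация — берём первый любой элемент и снова вниз
--     Собираем все группы (cls, size), сортируем по size убыв., фильтруем по threshold,
--     возвращаем список class_name
--
--     Возвращает список class_name, у которых после группировки получилось >=threshold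
--     """
--     # 1) построчные счётчики
--     per_row = [Counter(row) for row in rows]
--
--     # 2) группируем построчные количества по классам
--     by_class: defaultdict[str, List[int]] = defaultdict(list)
--
--     # Собираем все классы, которые встречались хотя бы где-то (множество)
--     all_classes = set()
--     for rc in per_row:
--         all_classes.update(rc.keys())
--
--     for cls in all_classes:
--         # Считаем количество классов в каждой строке per_row
--         counts = [rc.get(cls, 0) for rc in per_row]
--         if sum(counts) == 0:
--             continue
--
--         # 3) Формируем группы для этого класса (cls)
--         while True:
--             # Находим индексы строк, где остались элементы
--             pos_idx = [i for i, v in enumerate(counts) if v > 0]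
--             if not pos_idx:
--                 break
--             # Размер группы = количество строк с положительным остатком
--             group_size = len(pos_idx)
--             by_class[cls].append(group_size)
--             # Вычитаем по одному из всех строк, где ещё оставались элементы
--             for i in pos_idx:
--                 counts[i] -= 1
--
--     # 4) Соберём все группы (class_name, size)
--     grouped: List[Tuple[str, int]] = []
--     for cls, sizes in by_class.items():
--         for s in sizes:
--             grouped.append((cls, s))
--
--     # 5) сортировка по размеру группы убыв. (детерминированный вывод, для тестов)
--     grouped.sort(key=lambda x: (-x[1], x[0]))
--
--     # 6) фильтр по порогу и возврат class_name
--     result = [cls for cls, size in grouped if size >= threshold]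
--     return result
-- ===== SOURCE B (Python) =====
-- from collections import Counter
--
-- def group_class_name(rows, threshold=3):
--     # Per-class conjugate-histogram: the k-th group's size is the number of rows
--     # holding >= k copies of the class, obtained from a count histogram in one
--     # descending sweep instead of A's iterative subtract-one passes.
--     per_row = [Counter(row) for row in rows]
--
--     all_classes = set()
--     for rc in per_row:
--         all_classes.update(rc.keys())
--
--     grouped = []
--     for cls in all_classes:
--         counts = [rc.get(cls, 0) for rc in per_row]
--         hist = Counter(counts)
--         m = max(counts, default=0)
--         ge = sum(1 for c in counts if c > 0)
--         for k in range(1, m + 1):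
--             grouped.append((cls, ge))
--             ge -= hist[k]
--
--     grouped.sort(key=lambda x: (-x[1], x[0]))
--     return [cls for cls, size in grouped if size >= threshold]
-- ===== Notes on version B (the rewrite author's own statement) =====
-- stated objective: alternative
-- what changed: A forms each class's groups by repeatedly scanning for rows with a positive remaining count and subtracting one until exhausted; B reads all group sizes directly off a histogram of per-row counts (group k's size = #rows with count >= k) in one descending suffix-sum sweep.
import Mathlib
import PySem

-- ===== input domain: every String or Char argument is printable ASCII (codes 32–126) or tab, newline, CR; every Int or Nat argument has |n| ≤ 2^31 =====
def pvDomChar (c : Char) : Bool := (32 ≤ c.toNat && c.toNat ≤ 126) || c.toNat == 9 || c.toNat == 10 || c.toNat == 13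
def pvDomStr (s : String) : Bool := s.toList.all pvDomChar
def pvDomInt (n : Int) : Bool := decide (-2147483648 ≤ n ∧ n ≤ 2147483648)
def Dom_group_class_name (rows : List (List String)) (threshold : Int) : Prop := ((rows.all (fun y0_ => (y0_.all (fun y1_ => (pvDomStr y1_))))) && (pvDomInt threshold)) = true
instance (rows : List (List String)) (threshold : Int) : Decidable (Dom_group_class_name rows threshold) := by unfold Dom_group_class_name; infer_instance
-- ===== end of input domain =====

-- B replaces A's iterative subtract-one grouping loop by a conjugate count
-- histogram (group k's size = #rows with count ≥ k), read off in one sweep;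
-- objective: alternative algorithm, identical return value.

-- ===== PORT A =====
-- the Python 'while True' loop; the fuel (sum of the positive counts + 1) is a
-- proven-sufficient bound on the number of iterations, used only for totality
def pvWhileLoop : Nat → String → List Int → PySem.Dict String (List Int) → PySem.Dict String (List Int)
  | 0, _, _, bc => bc
  | fuel+1, cls, counts, bc =>
    let pos_idx : List Int := (PySem.List.enumerate counts 0).foldl
      (fun acc p => if 0 < p.2 then acc ++ [p.1] else acc) []
    if pos_idx = [] then bc
    else
      let group_size : Int := pos_idx.length
      let bc' := bc.modify cls [] (· ++ [group_size])
      let counts' := pos_idx.foldl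
        (fun cs i => PySem.List.pySetD cs i (PySem.List.pyGetD cs i 0 - 1)) counts
      pvWhileLoop fuel cls counts' bc'

def group_class_name (rows : List (List String)) (threshold : Int) : List String :=
  let per_row := rows.map (fun row => PySem.Dict.counter row)
  let all_classes : PySem.Set String :=
    per_row.foldl (fun s rc => PySem.Set.update s rc.keys) PySem.Set.empty
  let by_class : PySem.Dict String (List Int) :=
    all_classes.foldl (fun bc cls =>
      let counts : List Int := per_row.map (fun rc => rc.getD cls 0)
      if counts.sum = 0 then bc
      else pvWhileLoop (counts.foldl (fun a v => a + v.toNat) 0 + 1) cls counts bc)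
      PySem.Dict.empty
  let grouped : List (String × Int) :=
    by_class.items.foldl (fun acc p => p.2.foldl (fun acc s => acc ++ [(p.1, s)]) acc) []
  let grouped' := PySem.List.sorted2 grouped (fun x => -x.2) (fun x => x.1)
  grouped'.foldl (fun res p => if threshold ≤ p.2 then res ++ [p.1] else res) []

-- ===== PORT B =====
def group_class_name_alt (rows : List (List String)) (threshold : Int) : List String :=
  let per_row := rows.map (fun row => PySem.Dict.counter row)
  let all_classes : PySem.Set String :=
    per_row.foldl (fun s rc => PySem.Set.update s rc.keys) PySem.Set.empty
  let grouped : List (String × Int) :=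
    all_classes.foldl (fun grouped cls =>
      let counts : List Int := per_row.map (fun rc => rc.getD cls 0)
      let hist := PySem.Dict.counter counts
      let m := PySem.List.maxD counts (fun c => c) 0
      let ge : Int := counts.foldl (fun a c => if 0 < c then a + 1 else a) 0
      ((PySem.List.pyRange 1 (m+1) 1).foldl
        (fun st k => (st.1 ++ [(cls, st.2)], st.2 - hist.getD k 0)) (grouped, ge)).1) []
  let grouped' := PySem.List.sorted2 grouped (fun x => -x.2) (fun x => x.1)
  grouped'.foldl (fun res p => if threshold ≤ p.2 then res ++ [p.1] else res) []

-- ===== PRECONDITION & SPEC =====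
def Spec_group_class_name (rows : List (List String)) (threshold : Int) (out : List String) : Prop := out = group_class_name_alt rows threshold
instance (rows : List (List String)) (threshold : Int) (out : List String) : Decidable (Spec_group_class_name rows threshold out) := by unfold Spec_group_class_name; infer_instance

-- ===== CLAIM (what is proved, stated in full; the proofs are below) =====
def Claim_equal_group_class_name : Prop := ∀ (rows : List (List String)) (threshold : Int), Dom_group_class_name rows threshold → Spec_group_class_name rows threshold (group_class_name rows threshold)

-- ===== LEMMAS AND PROOFS =====

def pvDec1 (v : Int) : Int := if 0 < v then v - 1 else v
def pvMaxNat (cs : List Int) : Nat := cs.foldl (fun a v => Nat.max a v.toNat) 0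
def pvBlk (cs : List Int) : List Int :=
  (List.range (pvMaxNat cs)).map (fun j : Nat => ((cs.countP (fun v => decide ((j:Int) < v))) : Int))

theorem pvDec1_toNat (v : Int) : (pvDec1 v).toNat = v.toNat - 1 := by
  unfold pvDec1; split_ifs <;> omega

theorem pvFoldlMax_sub (cs : List Int) : ∀ a : Nat,
    cs.foldl (fun a v => Nat.max a (pvDec1 v).toNat) (a-1) = cs.foldl (fun a v => Nat.max a v.toNat) a - 1 := by
  induction cs with
  | nil => intro a; rfl
  | cons x t ih =>
    intro a; simp only [List.foldl_cons]
    rw [pvDec1_toNat, show Nat.max (a-1) (x.toNat-1) = Nat.max a x.toNat - 1 by simp only [Nat.max_def]; split_ifs <;> omega]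
    exact ih _

theorem pvMaxNat_map_dec1 (cs : List Int) : pvMaxNat (cs.map pvDec1) = pvMaxNat cs - 1 := by
  unfold pvMaxNat
  rw [List.foldl_map]
  simpa using pvFoldlMax_sub cs 0

theorem pvFoldlMax_zero (cs : List Int) : ∀ a : Nat,
    (cs.foldl (fun a v => Nat.max a v.toNat) a = 0 ↔ a = 0 ∧ ∀ v ∈ cs, v.toNat = 0) := by
  induction cs with
  | nil => simp
  | cons x t ih =>
    intro a
    simp only [List.foldl_cons, ih, List.mem_cons]
    constructor
    · rintro ⟨hm, hall⟩
      rw [Nat.max_eq_zero_iff] at hm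
      refine ⟨hm.1, fun v hv => ?_⟩
      rcases hv with rfl | hv
      · exact hm.2
      · exact hall v hv
    · rintro ⟨ha, hall⟩
      refine ⟨?_, fun v hv => hall v (Or.inr hv)⟩
      rw [Nat.max_eq_zero_iff]
      exact ⟨ha, hall x (Or.inl rfl)⟩

theorem pvMaxNat_eq_zero_iff (cs : List Int) :
    pvMaxNat cs = 0 ↔ cs.countP (fun v => decide (0 < v)) = 0 := by
  rw [List.countP_eq_zero]
  rw [pvMaxNat, pvFoldlMax_zero]
  simp only [true_and]
  constructor
  · intro hall v hv
    have := hall v hv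
    simp only [decide_eq_true_eq]
    omega
  · intro hall v hv
    have := hall v hv
    simp only [decide_eq_true_eq] at this
    omega

theorem pvCountP_map_dec1 (cs : List Int) (j : Nat) :
    (cs.map pvDec1).countP (fun v => decide ((j:Int) < v))
      = cs.countP (fun v => decide ((j:Int) + 1 < v)) := by
  rw [List.countP_map]
  apply List.countP_congr
  intro v _
  simp only [Function.comp, pvDec1]
  split_ifs with h <;> simp <;> omega

theorem pvCountP_split (cs : List Int) (a : Int) :
    cs.countP (fun v => decide (a < v))
      = cs.count (a+1) + cs.countP (fun v => decide (a + 1 < v)) := by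
  induction cs with
  | nil => simp
  | cons x t ih =>
    simp only [List.countP_cons, List.count_cons, ih]
    by_cases hx : x = a + 1
    · subst hx; simp; omega
    · by_cases h2 : a < x
      · have : a + 1 < x := by omega
        simp [hx, h2, this]; omega
      · have : ¬ (a + 1 < x) := by omega
        simp [hx, h2, this]

theorem pvBlk_cons (cs : List Int) (h : 0 < pvMaxNat cs) :
    pvBlk cs = ((cs.countP (fun v => decide ((0:Int) < v)) : Int)) :: pvBlk (cs.map pvDec1) := by
  unfold pvBlk
  rw [pvMaxNat_map_dec1]
  obtain ⟨M, hM⟩ : ∃ M, pvMaxNat cs = M + 1 := ⟨pvMaxNat cs - 1, by omega⟩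
  rw [hM, Nat.add_sub_cancel, List.range_succ_eq_map, List.map_cons, List.map_map]
  congr 1
  apply List.map_congr_left
  intro a _
  simp only [Function.comp_apply, pvCountP_map_dec1]
  congr 3

theorem pvEnumerate_shift (cs : List Int) : ∀ (s : Int),
    PySem.List.enumerate cs (s+1) = (PySem.List.enumerate cs s).map (fun p => (p.1 + 1, p.2)) := by
  induction cs with
  | nil => intro s; simp [PySem.List.enumerate]
  | cons x t ih =>
    intro s
    rw [PySem.List.enumerate_cons, PySem.List.enumerate_cons, List.map_cons, ih]

theorem pvPosIdx_eq (cs : List Int) (s : Int) :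
    (PySem.List.enumerate cs s).foldl (fun acc p => if 0 < p.2 then acc ++ [p.1] else acc) []
      = ((PySem.List.enumerate cs s).filter (fun p => decide (0 < p.2))).map (·.1) := by
  simpa using PySem.List.foldl_append_if (fun p : Int × Int => decide (0 < p.2)) (·.1)
    (PySem.List.enumerate cs s) []

theorem pvPosIdx_length (cs : List Int) : ∀ (s : Int),
    ((PySem.List.enumerate cs s).filter (fun p => decide (0 < p.2))).length
      = cs.countP (fun v => decide (0 < v)) := by
  induction cs with
  | nil => intro s; simp [PySem.List.enumerate]
  | cons x t ih =>
    intro s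
    rw [PySem.List.enumerate_cons, List.countP_cons]
    by_cases hx : (0:Int) < x
    · simp [hx, ih]
    · simp [hx, ih]

theorem pvSubAux (idxs : List Int) : ∀ (x : Int) (t : List Int), (∀ i ∈ idxs, 1 ≤ i) →
    idxs.foldl (fun cs i => PySem.List.pySetD cs i (PySem.List.pyGetD cs i 0 - 1)) (x :: t)
      = x :: (idxs.map (fun i => i - 1)).foldl
          (fun cs i => PySem.List.pySetD cs i (PySem.List.pyGetD cs i 0 - 1)) t := by
  induction idxs with
  | nil => intro x t _; rfl
  | cons i rest ih =>
    intro x t h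
    have hi : 1 ≤ i := h i (by simp)
    have h1 : PySem.List.pyGetD (x :: t) i 0 = PySem.List.pyGetD t (i-1) 0 := by
      rw [PySem.List.pyGetD_of_nonneg _ _ (by omega), PySem.List.pyGetD_of_nonneg _ _ (by omega)]
      have : i.toNat = (i-1).toNat + 1 := by omega
      rw [this]
      rfl
    have h2 : ∀ v, PySem.List.pySetD (x :: t) i v = x :: PySem.List.pySetD t (i-1) v := by
      intro v
      rw [PySem.List.pySetD_of_nonneg _ _ (by omega), PySem.List.pySetD_of_nonneg _ _ (by omega)]
      have : i.toNat = (i-1).toNat + 1 := by omega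
      rw [this]
      rfl
    simp only [List.foldl_cons, List.map_cons, h1, h2]
    exact ih x _ (fun j hj => h j (by simp [hj]))

theorem pvSubFold_eq (cs : List Int) :
    (((PySem.List.enumerate cs 0).filter (fun p => decide (0 < p.2))).map (·.1)).foldl
        (fun cs i => PySem.List.pySetD cs i (PySem.List.pyGetD cs i 0 - 1)) cs
      = cs.map pvDec1 := by
  induction cs with
  | nil => simp [PySem.List.enumerate]
  | cons x t ih =>
    rw [PySem.List.enumerate_cons]
    have hshift : PySem.List.enumerate t (0+1) = (PySem.List.enumerate t 0).map (fun p => (p.1 + 1, p.2)) :=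
      pvEnumerate_shift t 0
    have hge : ∀ i ∈ (((PySem.List.enumerate t 0).filter (fun p => decide (0 < p.2))).map (·.1)).map (fun i => i + 1), 1 ≤ i := by
      intro i hi
      simp only [List.mem_map] at hi
      obtain ⟨j, ⟨p, hp, rfl⟩, rfl⟩ := hi
      have := (PySem.List.mem_enumerate_iff _ _ _).mp (List.mem_of_mem_filter hp)
      obtain ⟨k, hk, rfl⟩ := this
      omega
    have hq : ((fun p : Int × Int => decide (0 < p.2)) ∘ fun p : Int × Int => (p.1 + 1, p.2))
        = (fun p : Int × Int => decide (0 < p.2)) := by funext p; rfl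
    have h0get : PySem.List.pyGetD (x :: t) 0 0 = x := by
      rw [PySem.List.pyGetD_of_nonneg _ _ le_rfl]; rfl
    have h0set : ∀ v, PySem.List.pySetD (x :: t) 0 v = v :: t := by
      intro v; rw [PySem.List.pySetD_of_nonneg _ _ le_rfl]; rfl
    simp only [List.map_map, Function.comp_def] at hge
    by_cases hx : (0:Int) < x
    · simp only [List.filter_cons, hx, decide_true, if_true, hshift, List.filter_map, hq,
        List.map_cons, List.map_map, Function.comp_def, List.foldl_cons, h0get, h0set]
      rw [pvSubAux _ _ _ hge]
      simp only [List.map_map, Function.comp_def, add_sub_cancel_right]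
      rw [ih]
      simp [pvDec1, hx]
    · simp only [List.filter_cons, hx, decide_false, Bool.false_eq_true, if_false, hshift, List.filter_map, hq,
        List.map_map, Function.comp_def]
      rw [pvSubAux _ _ _ hge]
      simp only [List.map_map, Function.comp_def, add_sub_cancel_right]
      rw [ih]
      simp [pvDec1, hx]

theorem pvBlk_nil (cs : List Int) (h : pvMaxNat cs = 0) : pvBlk cs = [] := by
  unfold pvBlk; rw [h]; rfl

theorem pvWhileLoop_eq (fuel : Nat) (cls : String) :
    ∀ cs bc, (∀ v ∈ cs, 0 ≤ v) → pvMaxNat cs ≤ fuel →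
    pvWhileLoop fuel cls cs bc
      = (pvBlk cs).foldl (fun b s => b.modify cls [] (· ++ [s])) bc := by
  induction fuel with
  | zero =>
    intro cs bc _ hf
    rw [pvBlk_nil cs (by omega)]
    rfl
  | succ fuel ih =>
    intro cs bc hnn hf
    rw [pvWhileLoop]
    simp only [pvPosIdx_eq]
    by_cases hz : cs.countP (fun v => decide (0 < v)) = 0
    · have hm0 : pvMaxNat cs = 0 := (pvMaxNat_eq_zero_iff cs).mpr hz
      have hnil : ((PySem.List.enumerate cs 0).filter (fun p => decide (0 < p.2))).map (·.1) = [] := by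
        rw [List.map_eq_nil_iff, ← List.length_eq_zero_iff, pvPosIdx_length]
        exact hz
      rw [pvBlk_nil cs hm0]
      simp [hnil]
    · have hnil : ¬ (((PySem.List.enumerate cs 0).filter (fun p => decide (0 < p.2))).map (·.1) = []) := by
        rw [List.map_eq_nil_iff, ← List.length_eq_zero_iff, pvPosIdx_length]
        exact hz
      simp only [hnil, if_false]
      have hlen : ((((PySem.List.enumerate cs 0).filter (fun p => decide (0 < p.2))).map (·.1)).length : Int)
          = (cs.countP (fun v => decide (0 < v)) : Int) := by
        rw [List.length_map, pvPosIdx_length]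
      have hpos : 0 < pvMaxNat cs := by
        rcases Nat.eq_zero_or_pos (pvMaxNat cs) with h0 | h0
        · exact absurd ((pvMaxNat_eq_zero_iff cs).mp h0) hz
        · exact h0
      rw [pvSubFold_eq, pvBlk_cons cs hpos, List.foldl_cons, hlen]
      exact ih (cs.map pvDec1) _
        (by intro v hv; obtain ⟨w, hw, rfl⟩ := List.mem_map.mp hv; unfold pvDec1
            have := hnn w hw; split_ifs <;> omega)
        (by rw [pvMaxNat_map_dec1]; omega)

theorem pvFoldlSum_mono (cs : List Int) : ∀ a b : Nat, a ≤ b →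
    cs.foldl (fun a v => a + v.toNat) a ≤ cs.foldl (fun a v => a + v.toNat) b := by
  induction cs with
  | nil => intro a b h; exact h
  | cons x t ih => intro a b h; exact ih _ _ (Nat.add_le_add_right h _)

theorem pvMaxNat_le_sum_fuel (cs : List Int) :
    pvMaxNat cs ≤ cs.foldl (fun a v => a + v.toNat) 0 + 1 := by
  unfold pvMaxNat
  have : ∀ a : Nat, cs.foldl (fun a v => Nat.max a v.toNat) a ≤ cs.foldl (fun a v => a + v.toNat) a := by
    induction cs with
    | nil => intro a; exact le_rfl
    | cons x t ih =>
      intro a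
      calc t.foldl (fun a v => Nat.max a v.toNat) (Nat.max a x.toNat)
          ≤ t.foldl (fun a v => a + v.toNat) (Nat.max a x.toNat) := ih _
        _ ≤ t.foldl (fun a v => a + v.toNat) (a + x.toNat) := by
            apply pvFoldlSum_mono
            simp only [Nat.max_def]; split_ifs <;> omega
  exact le_trans (this 0) (by omega)

theorem pvAllNonpos (cs : List Int) : (∀ v ∈ cs, 0 ≤ v) → cs.sum = 0 →
    ∀ v ∈ cs, ¬ ((fun v => decide ((0:Int) < v)) v = true) := by
  induction cs with
  | nil => simp
  | cons x t ih =>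
    intro h hs v hv
    have hx := h x (List.mem_cons_self)
    have ht : ∀ w ∈ t, 0 ≤ w := fun w hw => h w (List.mem_cons_of_mem _ hw)
    have hts : (0:Int) ≤ t.sum := List.sum_nonneg ht
    rw [List.sum_cons] at hs
    rcases List.mem_cons.mp hv with rfl | hv
    · simp only [decide_eq_true_eq]; omega
    · exact ih ht (by omega) v hv

theorem pvSum_zero_blk (cs : List Int) (h : ∀ v ∈ cs, 0 ≤ v) (hs : cs.sum = 0) :
    pvBlk cs = [] := by
  apply pvBlk_nil
  rw [pvMaxNat_eq_zero_iff, List.countP_eq_zero]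
  exact pvAllNonpos cs h hs

theorem pvMaxD_eq (cs : List Int) (h : ∀ v ∈ cs, 0 ≤ v) :
    PySem.List.maxD cs (fun c => c) 0 = (pvMaxNat cs : Int) := by
  cases cs with
  | nil => rfl
  | cons x t =>
    unfold PySem.List.maxD
    rw [PySem.List.max?_id_cons]
    simp only [Option.getD_some]
    have : ∀ (l : List Int) (a : Int), 0 ≤ a → (∀ v ∈ l, 0 ≤ v) →
        l.foldl max a = ((l.foldl (fun n v => Nat.max n v.toNat) a.toNat : Nat) : Int) := by
      intro l
      induction l with
      | nil => intro a ha _; simp [Int.toNat_of_nonneg ha]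
      | cons y u ih =>
        intro a ha hl
        have hy := hl y (by simp)
        rw [List.foldl_cons, List.foldl_cons, ih (max a y) (by omega)
          (fun v hv => hl v (List.mem_cons_of_mem _ hv))]
        congr 2
        simp only [max_def]
        split_ifs <;> omega
    rw [this t x (h x (by simp)) (fun v hv => h v (List.mem_cons_of_mem _ hv))]
    unfold pvMaxNat
    rw [List.foldl_cons]
    congr 2

theorem pvPyRange_nil (a b : Int) (h : b ≤ a) : PySem.List.pyRange a b 1 = [] := by
  simp only [PySem.List.pyRange]
  norm_num
  intro h2
  omega

theorem pvSweepAux (cls : String) (cs : List Int) (M : Nat) : ∀ (n a : Nat), a + n = M → ∀ (g : List (String × Int)),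
    ((PySem.List.pyRange ((a:Int)+1) ((M:Int)+1) 1).foldl
        (fun st k => (st.1 ++ [(cls, st.2)], st.2 - (PySem.Dict.counter cs).getD k 0))
        (g, (cs.countP (fun v => decide ((a:Int) < v)) : Int))).1
      = g ++ (List.range' a n).map (fun j : Nat => (cls, (cs.countP (fun v => decide ((j:Int) < v)) : Int))) := by
  intro n
  induction n with
  | zero =>
    intro a ha g
    rw [pvPyRange_nil _ _ (by omega)]
    simp
  | succ n ih =>
    intro a ha g
    rw [PySem.List.pyRange_one_cons (by omega), List.foldl_cons]
    have hstep : (cs.countP (fun v => decide ((a:Int) < v)) : Int)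
        - (PySem.Dict.counter cs).getD ((a:Int)+1) 0
        = (cs.countP (fun v => decide (((a+1:Nat):Int) < v)) : Int) := by
      rw [PySem.Dict.getD_counter]
      have := pvCountP_split cs (a:Int)
      push_cast
      omega
    rw [List.range'_succ, List.map_cons]
    have := ih (a+1) (by omega) (g ++ [(cls, (cs.countP (fun v => decide ((a:Int) < v)) : Int))])
    push_cast at this hstep ⊢
    rw [hstep, this]
    simp

theorem pvBSweep_eq (cls : String) (cs : List Int) (h : ∀ v ∈ cs, 0 ≤ v) (g : List (String × Int)) :
    ((PySem.List.pyRange 1 (PySem.List.maxD cs (fun c => c) 0 + 1) 1).foldl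
        (fun st k => (st.1 ++ [(cls, st.2)], st.2 - (PySem.Dict.counter cs).getD k 0))
        (g, cs.foldl (fun a c => if 0 < c then a + 1 else a) 0)).1
      = g ++ (pvBlk cs).map (fun s => (cls, s)) := by
  rw [pvMaxD_eq cs h]
  have hinit : cs.foldl (fun a c => if 0 < c then a + 1 else a) 0
      = (cs.countP (fun v => decide ((0:Int) < v)) : Int) := by
    simpa using PySem.List.foldl_if_add_one (fun c : Int => decide (0 < c)) cs 0
  have := pvSweepAux cls cs (pvMaxNat cs) (pvMaxNat cs) 0 (by omega) g
  push_cast at this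
  rw [hinit]
  rw [this]
  unfold pvBlk
  rw [List.range_eq_range', List.map_map]
  rfl

theorem pvModify_fresh (cls : String) (bc : PySem.Dict String (List Int)) (s : Int)
    (h : cls ∉ bc.keys) :
    (bc.modify cls [] (· ++ [s])).items = bc.items ++ [(cls, [s])] := by
  have hkeys : ∀ p ∈ bc.items, (p.1 == cls) = false := by
    intro p hp
    have hne : p.1 ≠ cls := by
      intro heq
      apply h
      unfold PySem.Dict.keys
      exact heq ▸ List.mem_map_of_mem hp
    simp [hne]
  have hcontains : bc.contains cls = false := by
    unfold PySem.Dict.contains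
    rw [List.any_eq_false]
    intro p hp
    simp [hkeys p hp]
  have hget : bc.get? cls = none := (PySem.Dict.get?_eq_none_iff_contains bc cls).mpr hcontains
  unfold PySem.Dict.modify PySem.Dict.insert PySem.Dict.getD
  rw [hcontains, hget]
  simp

theorem pvDictBlockAux (cls : String) (sizes : List Int) : ∀ (l : List (String × List Int)) (v : List Int),
    (∀ p ∈ l, p.1 ≠ cls) →
    (sizes.foldl (fun b s => b.modify cls [] (· ++ [s])) (PySem.Dict.mk (l ++ [(cls, v)]))).items
      = l ++ [(cls, v ++ sizes)] := by
  induction sizes with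
  | nil => intro l v _; simp
  | cons s rest ih =>
    intro l v hl
    have hfind : List.find? (fun p => p.1 == cls) l = none := by
      rw [List.find?_eq_none]
      intro p hp
      simpa using hl p hp
    have hget : (PySem.Dict.mk (l ++ [(cls, v)])).get? cls = some v := by
      unfold PySem.Dict.get?
      rw [List.find?_append, hfind]
      simp
    have hcontains : (PySem.Dict.mk (l ++ [(cls, v)])).contains cls = true := by
      unfold PySem.Dict.contains
      rw [List.any_append]
      simp
    have hmod : (PySem.Dict.mk (l ++ [(cls, v)])).modify cls [] (· ++ [s])
        = PySem.Dict.mk (l ++ [(cls, v ++ [s])]) := by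
      unfold PySem.Dict.modify PySem.Dict.insert PySem.Dict.getD
      rw [hcontains, hget]
      simp only [if_true, Option.getD_some, List.map_append]
      congr 1
      congr 1
      · nth_rewrite 2 [show l = l.map id from (List.map_id l).symm]
        apply List.map_congr_left
        intro p hp
        simp [show (p.1 == cls) = false by simpa using hl p hp]
      · simp
    rw [List.foldl_cons, hmod, ih l (v ++ [s]) hl]
    simp

theorem pvDictBlock_items (cls : String) (sizes : List Int) (bc : PySem.Dict String (List Int))
    (h : cls ∉ bc.keys) :
    (sizes.foldl (fun b s => b.modify cls [] (· ++ [s])) bc).items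
      = bc.items ++ (if sizes = [] then [] else [(cls, sizes)]) := by
  cases sizes with
  | nil => simp
  | cons s rest =>
    rw [List.foldl_cons, if_neg (by simp)]
    have hl : ∀ p ∈ bc.items, p.1 ≠ cls := by
      intro p hp heq
      exact h (heq ▸ List.mem_map_of_mem (f := Prod.fst) hp)
    have : bc.modify cls [] (· ++ [s]) = PySem.Dict.mk (bc.items ++ [(cls, [s])]) := by
      cases bc with
      | mk items => exact congrArg PySem.Dict.mk (pvModify_fresh cls _ s h)
    rw [this, pvDictBlockAux cls rest bc.items [s] hl]
    simp

def pvCountsOf (per_row : List (PySem.Dict String Int)) (cls : String) : List Int :=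
  per_row.map (fun rc => rc.getD cls 0)

def pvGroupedSpec (per_row : List (PySem.Dict String Int)) (classes : List String) : List (String × Int) :=
  classes.flatMap (fun cls => (pvBlk (pvCountsOf per_row cls)).map (fun s => (cls, s)))

theorem pvSetFold_nodup (rows : List (List String)) :
    ((rows.map (fun row => PySem.Dict.counter row)).foldl
      (fun s rc => PySem.Set.update s rc.keys) PySem.Set.empty).Nodup := by
  have : ∀ (l : List (PySem.Dict String Int)) (s : PySem.Set String), s.Nodup →
      (l.foldl (fun s rc => PySem.Set.update s rc.keys) s).Nodup := by
    intro l
    induction l with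
    | nil => intro s hs; exact hs
    | cons rc t ih => intro s hs; exact ih _ (PySem.Set.nodup_update _ _ hs)
  exact this _ _ (by simp [PySem.Set.empty])

theorem pvCounts_nonneg (rows : List (List String)) (cls : String) :
    ∀ v ∈ pvCountsOf (rows.map (fun row => PySem.Dict.counter row)) cls, 0 ≤ v := by
  intro v hv
  unfold pvCountsOf at hv
  rw [List.map_map] at hv
  obtain ⟨row, _, rfl⟩ := List.mem_map.mp hv
  simp only [Function.comp_apply, PySem.Dict.getD_counter]
  positivity

theorem pvByClass_items (per_row : List (PySem.Dict String Int)) :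
    ∀ (classes : List String) (bc : PySem.Dict String (List Int)),
    classes.Nodup → (∀ c ∈ classes, c ∉ bc.keys) →
    (classes.foldl (fun bc cls =>
        (pvBlk (pvCountsOf per_row cls)).foldl (fun b s => b.modify cls [] (· ++ [s])) bc) bc).items
      = bc.items ++ classes.flatMap (fun cls =>
          if pvBlk (pvCountsOf per_row cls) = [] then []
          else [(cls, pvBlk (pvCountsOf per_row cls))]) := by
  intro classes
  induction classes with
  | nil => intro bc _ _; simp
  | cons c rest ih =>
    intro bc hnd hkeys
    rw [List.foldl_cons]
    have hc : c ∉ bc.keys := hkeys c (by simp)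
    have hitems := pvDictBlock_items c (pvBlk (pvCountsOf per_row c)) bc hc
    have hkeys' : ∀ r ∈ rest, r ∉ ((pvBlk (pvCountsOf per_row c)).foldl
        (fun b s => b.modify c [] (· ++ [s])) bc).keys := by
      intro r hr
      have hrc : r ≠ c := by
        intro heq
        exact (List.nodup_cons.mp hnd).1 (heq ▸ hr)
      unfold PySem.Dict.keys
      rw [hitems, List.map_append, List.mem_append]
      rintro (h1 | h2)
      · exact hkeys r (List.mem_cons_of_mem _ hr) h1
      · split_ifs at h2 with hblk
        · simp at h2
        · simp at h2
          exact hrc h2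
    rw [ih _ (List.nodup_cons.mp hnd).2 hkeys', hitems]
    rw [List.flatMap_cons, List.append_assoc]

theorem pvGroupedA_eq (per_row : List (PySem.Dict String Int)) (classes : List String)
    (hnd : classes.Nodup)
    (hnn : ∀ cls, ∀ v ∈ pvCountsOf per_row cls, 0 ≤ v) :
    ((classes.foldl (fun bc cls =>
        if (per_row.map (fun rc => rc.getD cls 0)).sum = 0 then bc
        else pvWhileLoop ((per_row.map (fun rc => rc.getD cls 0)).foldl (fun a v => a + v.toNat) 0 + 1)
          cls (per_row.map (fun rc => rc.getD cls 0)) bc)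
        PySem.Dict.empty).items).foldl
          (fun acc p => p.2.foldl (fun acc s => acc ++ [(p.1, s)]) acc) []
      = pvGroupedSpec per_row classes := by
  have hstep : ∀ (bc : PySem.Dict String (List Int)), ∀ cls ∈ classes,
      (if (per_row.map (fun rc => rc.getD cls 0)).sum = 0 then bc
       else pvWhileLoop ((per_row.map (fun rc => rc.getD cls 0)).foldl (fun a v => a + v.toNat) 0 + 1)
         cls (per_row.map (fun rc => rc.getD cls 0)) bc)
      = (pvBlk (pvCountsOf per_row cls)).foldl (fun b s => b.modify cls [] (· ++ [s])) bc := by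
    intro bc cls _
    show (if (pvCountsOf per_row cls).sum = 0 then bc
       else pvWhileLoop ((pvCountsOf per_row cls).foldl (fun a v => a + v.toNat) 0 + 1) cls
         (pvCountsOf per_row cls) bc)
      = (pvBlk (pvCountsOf per_row cls)).foldl (fun b s => b.modify cls [] (· ++ [s])) bc
    split_ifs with hs
    · rw [pvSum_zero_blk _ (hnn cls) hs]
      rfl
    · exact pvWhileLoop_eq _ cls _ bc (hnn cls) (pvMaxNat_le_sum_fuel _)
  rw [PySem.List.foldl_congr_mem classes _ _ _ hstep]
  rw [pvByClass_items per_row classes PySem.Dict.empty hnd (by intro c _; simp [PySem.Dict.empty, PySem.Dict.keys])]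
  have hflat : ∀ (l : List (String × List Int)) (acc : List (String × Int)),
      l.foldl (fun acc p => p.2.foldl (fun acc s => acc ++ [(p.1, s)]) acc) acc
        = acc ++ l.flatMap (fun p => p.2.map (fun s => (p.1, s))) := by
    intro l
    induction l with
    | nil => intro acc; simp
    | cons p t iht =>
      intro acc
      rw [List.foldl_cons, PySem.List.foldl_append_singleton_eq_map, iht, List.flatMap_cons,
        List.append_assoc]
  rw [hflat]
  simp only [PySem.Dict.empty, List.nil_append]
  rw [List.flatMap_assoc]
  unfold pvGroupedSpec
  apply List.flatMap_congr
  intro cls _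
  by_cases hblk : pvBlk (pvCountsOf per_row cls) = []
  · simp [hblk]
  · simp [hblk]

theorem pvGroupedB_eq (per_row : List (PySem.Dict String Int)) (classes : List String)
    (hnn : ∀ cls, ∀ v ∈ pvCountsOf per_row cls, 0 ≤ v) :
    classes.foldl (fun grouped cls =>
        ((PySem.List.pyRange 1 (PySem.List.maxD (per_row.map (fun rc => rc.getD cls 0)) (fun c => c) 0 + 1) 1).foldl
          (fun st k => (st.1 ++ [(cls, st.2)],
            st.2 - (PySem.Dict.counter (per_row.map (fun rc => rc.getD cls 0))).getD k 0))
          (grouped, (per_row.map (fun rc => rc.getD cls 0)).foldl (fun a c => if 0 < c then a + 1 else a) 0)).1) []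
      = pvGroupedSpec per_row classes := by
  have hstep : ∀ (g : List (String × Int)), ∀ cls ∈ classes,
      ((PySem.List.pyRange 1 (PySem.List.maxD (per_row.map (fun rc => rc.getD cls 0)) (fun c => c) 0 + 1) 1).foldl
          (fun st k => (st.1 ++ [(cls, st.2)],
            st.2 - (PySem.Dict.counter (per_row.map (fun rc => rc.getD cls 0))).getD k 0))
          (g, (per_row.map (fun rc => rc.getD cls 0)).foldl (fun a c => if 0 < c then a + 1 else a) 0)).1
      = g ++ (pvBlk (pvCountsOf per_row cls)).map (fun s => (cls, s)) := by
    intro g cls _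
    exact pvBSweep_eq cls (pvCountsOf per_row cls) (hnn cls) g
  rw [PySem.List.foldl_congr_mem classes _ _ _ hstep,
    PySem.List.foldl_append_eq_flatMap (fun cls => (pvBlk (pvCountsOf per_row cls)).map (fun s => (cls, s))) classes []]
  rfl


theorem group_class_name_spec' (rows : List (List String)) (threshold : Int) :
    group_class_name rows threshold = group_class_name_alt rows threshold := by
  simp only [group_class_name, group_class_name_alt]
  rw [pvGroupedA_eq (rows.map (fun row => PySem.Dict.counter row)) _ (pvSetFold_nodup rows)
        (pvCounts_nonneg rows),
      pvGroupedB_eq (rows.map (fun row => PySem.Dict.counter row)) _ (pvCounts_nonneg rows)]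

-- ===== VERDICT (by name: the statement is the Claim_ definition above) =====
theorem group_class_name_spec : Claim_equal_group_class_name := by
  intro rows threshold _
  unfold Spec_group_class_name
  exact group_class_name_spec' rows threshold
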